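-- pv_equiv track=rewrite | github.com/ghostonbutterbread/bug-bounty-harness | agents/manual_hunter.py | _group_surface_entries
-- ===== SOURCE A (Python) =====
-- from typing import Any
--
-- def _group_surface_entries(entries: list[dict[str, Any]]) -> list[tuple[str, list[str]]]:
--     grouped: dict[str, set[str]] = {}
--     for entry in entries:
--         relpath = _normalize_text(entry.get("file"))
--         class_name = _normalize_text(entry.get("class_name")).lower()
--         if not relpath or not class_name:
--             continue
--         grouped.setdefault(relpath, set()).add(class_name)
--     return [
--         (relpath, sorted(class_names))
--         for relpath, class_names in sorted(grouped.items())
--     ]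
--
-- def _normalize_text(value: Any) -> str:
--     return str(value or "").strip()
-- ===== SOURCE B (Python) =====
-- from typing import Any
--
-- def _normalize_text(value: Any) -> str:
--     return str(value or "").strip()
--
-- def _group_surface_entries(entries: list[dict[str, Any]]) -> list[tuple[str, list[str]]]:
--     pairs = []
--     for entry in entries:
--         relpath = _normalize_text(entry.get("file"))
--         class_name = _normalize_text(entry.get("class_name")).lower()
--         if relpath and class_name:
--             pairs.append((relpath, class_name))
--     return [
--         (relpath, sorted({c for p, c in pairs if p == relpath}))
--         for relpath in sorted({p for p, _ in pairs})
--     ]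
-- ===== Notes on version B (the rewrite author's own statement) =====
-- stated objective: simpler
-- what changed: B replaces A's dict-of-sets accumulator with a flat filtered (relpath, class_name) pair list, then builds the result by two comprehensions: sorted distinct relpaths, with a per-key scan of the pair list collecting that key's class names.
import Mathlib
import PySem

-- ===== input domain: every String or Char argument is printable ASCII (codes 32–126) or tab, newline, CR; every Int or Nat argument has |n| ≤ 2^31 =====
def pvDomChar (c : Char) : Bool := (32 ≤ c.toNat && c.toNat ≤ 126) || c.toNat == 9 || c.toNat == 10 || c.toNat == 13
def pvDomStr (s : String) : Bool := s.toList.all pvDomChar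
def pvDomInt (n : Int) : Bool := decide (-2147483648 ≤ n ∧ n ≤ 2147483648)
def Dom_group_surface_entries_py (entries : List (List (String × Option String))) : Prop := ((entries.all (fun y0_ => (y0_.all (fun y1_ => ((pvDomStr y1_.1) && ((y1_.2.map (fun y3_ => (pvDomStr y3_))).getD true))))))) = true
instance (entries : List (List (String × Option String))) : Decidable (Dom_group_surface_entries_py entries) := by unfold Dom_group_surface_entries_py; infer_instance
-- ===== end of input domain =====

-- B replaces A's dict-of-sets accumulator with a flat filtered pair list plus two
-- comprehensions (sorted distinct relpaths; per-key scan for class names); same output, not faster.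

-- _normalize_text(value) = str(value or "").strip(); on Option String, 'value or ""'
-- is getD "" (None → "", and "" stays "" either way).
def pvNormalizeText (value : Option String) : String := PySem.Str.strip (value.getD "")

-- relpath / class_name computed per entry (shared by both ports, exactly A's two lines)
def pvRelpath (entry : List (String × Option String)) : String :=
  pvNormalizeText (((PySem.Dict.mk entry).get? "file").getD none)
def pvClassName (entry : List (String × Option String)) : String :=
  PySem.Str.lower (pvNormalizeText (((PySem.Dict.mk entry).get? "class_name").getD none))

-- ===== PORT A =====
-- grouped.setdefault(relpath, set()).add(class_name) is grouped[relpath] = grouped.get(relpath, set()) ∪ {class_name},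
-- i.e. Dict.modify relpath Set.empty (·.add class_name) (same key order: new keys append).
-- sorted(grouped.items()) compares (key, set) tuples; dict keys are unique, so the
-- second component is never compared: sorted with key = fst is exact here.
def group_surface_entries_py (entries : List (List (String × Option String))) : List (String × List String) :=
  let grouped : PySem.Dict String (PySem.Set String) :=
    entries.foldl (fun g entry =>
      let relpath := pvRelpath entry
      let class_name := pvClassName entry
      if relpath = "" ∨ class_name = "" then g
      else g.modify relpath PySem.Set.empty (fun s => PySem.Set.add s class_name)) PySem.Dict.empty
  (PySem.List.sorted grouped.items (fun p => p.1) false).map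
    (fun p => (p.1, PySem.List.sorted p.2 (fun x => x) false))

-- ===== PORT B =====
def group_surface_entries_py_alt (entries : List (List (String × Option String))) : List (String × List String) :=
  let pairs : List (String × String) :=
    entries.foldl (fun acc entry =>
      let relpath := pvRelpath entry
      let class_name := pvClassName entry
      if relpath ≠ "" ∧ class_name ≠ "" then acc ++ [(relpath, class_name)] else acc) []
  (PySem.List.sorted (PySem.Set.ofList (pairs.map (fun p => p.1))) (fun x => x) false).map
    (fun relpath =>
      (relpath,
       PySem.List.sorted
         (PySem.Set.ofList ((pairs.filter (fun p => p.1 == relpath)).map (fun p => p.2)))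
         (fun x => x) false))

-- ===== PRECONDITION & SPEC =====
def Spec_group_surface_entries_py (entries : List (List (String × Option String))) (out : List (String × List String)) : Prop := out = group_surface_entries_py_alt entries
instance (entries : List (List (String × Option String))) (out : List (String × List String)) : Decidable (Spec_group_surface_entries_py entries out) := by unfold Spec_group_surface_entries_py; infer_instance

-- ===== CLAIM (what is proved, stated in full; the proofs are below) =====
def Claim_equal_group_surface_entries_py : Prop := ∀ (entries : List (List (String × Option String))), Dom_group_surface_entries_py entries → Spec_group_surface_entries_py entries (group_surface_entries_py entries)

-- ===== LEMMAS AND PROOFS =====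

-- the dict loop's value at any key: the Set.update of the class names of the matching pairs
lemma pv_getD_foldl_modify_add (l : List (List (String × Option String)))
    (d : PySem.Dict String (PySem.Set String)) (k : String) :
    (l.foldl (fun g entry =>
        g.modify (pvRelpath entry) PySem.Set.empty (fun s => PySem.Set.add s (pvClassName entry))) d).getD k PySem.Set.empty
      = PySem.Set.update (d.getD k PySem.Set.empty)
          ((l.filter (fun e => pvRelpath e == k)).map pvClassName) := by
  induction l generalizing d with
  | nil => simp [PySem.Set.update]
  | cons a t ih =>
    simp only [List.foldl_cons, ih, List.filter_cons]
    by_cases hk : pvRelpath a = k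
    · subst hk
      simp [PySem.Set.update]
    · rw [PySem.Dict.getD_modify]
      simp [hk, Ne.symm hk]

-- A's 'continue' loop is the fold over the filtered list (generic shape, kept abstract)
lemma pv_skip_filter {A B : Type} (p : A → Prop) [DecidablePred p] (f : B → A → B)
    (l : List A) (d : B) :
    l.foldl (fun g x => if p x then g else f g x) d
      = (l.filter (fun x => !(decide (p x)))).foldl f d := by
  induction l generalizing d with
  | nil => rfl
  | cons a t ih =>
    simp only [List.foldl_cons, List.filter_cons]
    by_cases h : p a
    · rw [if_pos h]; simp only [decide_eq_true h, Bool.not_true]; exact ih d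
    · rw [if_neg h]; simp only [decide_eq_false h, Bool.not_false, if_pos, List.foldl_cons]
      exact ih (f d a)

-- B's pair-building loop is the filtered map
lemma pv_pairs_eq (entries : List (List (String × Option String))) :
    (entries.foldl (fun acc entry =>
        if pvRelpath entry ≠ "" ∧ pvClassName entry ≠ "" then acc ++ [(pvRelpath entry, pvClassName entry)] else acc)
        ([] : List (String × String)))
      = (entries.filter (fun e => decide (pvRelpath e ≠ "" ∧ pvClassName e ≠ ""))).map
          (fun e => (pvRelpath e, pvClassName e)) := by
  rw [PySem.List.foldl_append_ite (p := fun e => pvRelpath e ≠ "" ∧ pvClassName e ≠ "")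
        (f := fun e => (pvRelpath e, pvClassName e))]
  simp

-- the two skip tests agree
lemma pv_filter_eq (entries : List (List (String × Option String))) :
    entries.filter (fun e => !(decide (pvRelpath e = "" ∨ pvClassName e = "")))
      = entries.filter (fun e => decide (pvRelpath e ≠ "" ∧ pvClassName e ≠ "")) := by
  apply List.filter_congr
  intro e _
  by_cases h1 : pvRelpath e = "" <;> by_cases h2 : pvClassName e = "" <;> simp [h1, h2]

lemma pv_loopA_eq (entries : List (List (String × Option String))) :
    (entries.foldl (fun g entry =>
        if pvRelpath entry = "" ∨ pvClassName entry = "" then g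
        else g.modify (pvRelpath entry) PySem.Set.empty (fun s => PySem.Set.add s (pvClassName entry)))
        (PySem.Dict.empty : PySem.Dict String (PySem.Set String)))
      = (entries.filter (fun e => decide (pvRelpath e ≠ "" ∧ pvClassName e ≠ ""))).foldl
          (fun g entry => g.modify (pvRelpath entry) PySem.Set.empty (fun s => PySem.Set.add s (pvClassName entry)))
          PySem.Dict.empty := by
  have h := pv_skip_filter (p := fun e => pvRelpath e = "" ∨ pvClassName e = "")
    (f := fun g entry => g.modify (pvRelpath entry) PySem.Set.empty (fun s => PySem.Set.add s (pvClassName entry)))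
    entries (PySem.Dict.empty : PySem.Dict String (PySem.Set String))
  rw [pv_filter_eq] at h
  exact h

theorem pv_main (entries : List (List (String × Option String))) :
    group_surface_entries_py entries = group_surface_entries_py_alt entries := by
  unfold group_surface_entries_py group_surface_entries_py_alt
  simp only []
  set l := entries.filter (fun e => decide (pvRelpath e ≠ "" ∧ pvClassName e ≠ "")) with hl
  -- A's dict loop over the filtered list
  rw [pv_loopA_eq, ← hl]
  rw [pv_pairs_eq, ← hl]
  set grouped := l.foldl (fun g e => g.modify (pvRelpath e) PySem.Set.empty (fun s => PySem.Set.add s (pvClassName e)))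
      (PySem.Dict.empty : PySem.Dict String (PySem.Set String)) with hg
  have hnodup : grouped.keys.Nodup := by
    rw [hg]
    exact PySem.Dict.nodup_keys_foldl_modify_key l pvRelpath PySem.Set.empty
      (fun _ e => fun s => PySem.Set.add s (pvClassName e)) PySem.Dict.empty
      PySem.Dict.nodup_keys_empty
  have hkeys : grouped.keys = PySem.Set.ofList (l.map pvRelpath) := by
    rw [hg, PySem.Dict.keys_foldl_modify_key]
    simp [PySem.Dict.keys_empty, PySem.Set.update, PySem.Set.ofList_eq_foldl]
  have hmapfst : (l.map (fun e => (pvRelpath e, pvClassName e))).map (fun p => p.1) = l.map pvRelpath := by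
    simp [List.map_map]
  have hitems : grouped.items = grouped.keys.map (fun k => (k, grouped.getD k PySem.Set.empty)) :=
    PySem.Dict.items_eq_map_keys grouped hnodup PySem.Set.empty
  -- sorted items by key = map over sorted keys
  have hsorted : PySem.List.sorted grouped.items (fun p => p.1) false
      = (PySem.List.sorted grouped.keys (fun x => x) false).map (fun k => (k, grouped.getD k PySem.Set.empty)) := by
    apply PySem.List.sorted_eq_of_perm_of_pairwise_lt
    · rw [hitems]
      exact (PySem.List.sorted_perm grouped.keys (fun x => x) false).map _
    · rw [List.pairwise_map]
      have := PySem.List.sorted_ofList_pairwise_lt (xs := l.map pvRelpath)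
      rw [← hkeys] at this
      exact this
  rw [hsorted, hmapfst, ← hkeys, List.map_map]
  apply List.map_congr_left
  intro k _
  simp only [Function.comp]
  congr 1
  -- per-key class names agree
  rw [hg, pv_getD_foldl_modify_add, List.filter_map]
  simp only [PySem.Dict.getD_empty]
  rw [List.map_map]
  have : ((l.filter (fun e => ((fun p => p.1 == k) ∘ fun e => (pvRelpath e, pvClassName e)) e)).map
        ((fun p => p.2) ∘ fun e => (pvRelpath e, pvClassName e)))
      = (l.filter (fun e => pvRelpath e == k)).map pvClassName := by
    rfl
  rw [this]
  simp [PySem.Set.update, PySem.Set.ofList_eq_foldl]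

-- ===== VERDICT (by name: the statement is the Claim_ definition above) =====
theorem group_surface_entries_py_spec : Claim_equal_group_surface_entries_py := by
  intro entries _
  unfold Spec_group_surface_entries_py
  exact pv_main entries
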